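-- pv_equiv track=rewrite | github.com/drozdd80/advent-of-code-2024 | day_11/main.py | precompute_stones
-- ===== SOURCE A (Python) =====
-- def precompute_stones(transformation_dict, limit):
--     precomputed_stone_n = {node: [0] * (limit + 1) for node in transformation_dict}
--
--     for node in transformation_dict:
--         precomputed_stone_n[node][0] = 1
--
--     for depth in range(1, limit + 1):
--         for node, (stone, _) in transformation_dict.items():
--             precomputed_stone_n[node][depth] = sum(precomputed_stone_n[neighbor][depth - 1] for neighbor in stone)
--
--     return precomputed_stone_n
-- ===== SOURCE B (Python) =====
-- def precompute_stones(transformation_dict, limit):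
--     result = {node: [] for node in transformation_dict}
--
--     def count(node, depth):
--         lst = result[node]
--         if depth < len(lst):
--             return lst[depth]
--         if depth == 0:
--             v = 1
--         else:
--             v = 0
--             for neighbor in transformation_dict[node][0]:
--                 v += count(neighbor, depth - 1)
--         lst.append(v)
--         return v
--
--     for depth in range(limit + 1):
--         for node in transformation_dict:
--             count(node, depth)
--     return result
-- ===== Notes on version B (the rewrite author's own statement) =====
-- stated objective: alternative
-- what changed: Replaces A's bottom-up table fill (preallocated zero-filled per-node arrays mutated by index at every depth) with a top-down memoized recursive helper count(node, depth) that computes a value on demand from the neighbors' values at depth-1 and caches it by appending it to the node's output list; the driver merely requests every (node, depth) pair.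
import Mathlib
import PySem

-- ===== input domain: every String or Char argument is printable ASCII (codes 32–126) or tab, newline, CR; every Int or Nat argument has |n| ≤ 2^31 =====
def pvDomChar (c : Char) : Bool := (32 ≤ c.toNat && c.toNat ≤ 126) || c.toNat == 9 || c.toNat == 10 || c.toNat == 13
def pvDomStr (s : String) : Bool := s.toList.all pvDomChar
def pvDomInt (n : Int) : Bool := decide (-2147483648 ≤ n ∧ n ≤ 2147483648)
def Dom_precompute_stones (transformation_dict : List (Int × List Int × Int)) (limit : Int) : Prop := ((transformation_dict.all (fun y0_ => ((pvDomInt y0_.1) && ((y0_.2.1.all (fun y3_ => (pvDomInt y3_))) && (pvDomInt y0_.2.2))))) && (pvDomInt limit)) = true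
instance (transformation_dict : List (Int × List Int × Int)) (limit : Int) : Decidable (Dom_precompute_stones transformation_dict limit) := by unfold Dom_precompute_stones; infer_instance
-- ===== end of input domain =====

-- B replaces A's bottom-up table fill (preallocated zero arrays written by index depth
-- by depth) with a top-down memoized recursive helper count(node, depth) that appends its
-- value to the node's output list; same cost, different decomposition. Equivalence of
-- RETURN values is proved.

-- ===== PORT A =====
-- the Python parameter is a dict; the association list is turned into one exactly as dict() would
def precompute_stones (transformation_dict : List (Int × List Int × Int)) (limit : Int) : List (Int × List Int) :=
  let d : PySem.Dict Int (List Int × Int) := PySem.Dict.ofList transformation_dict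
  -- {node: [0] * (limit + 1) for node in transformation_dict}
  let pre0 : PySem.Dict Int (List Int) :=
    d.keys.foldl (fun acc node => acc.insert node (List.replicate (limit + 1).toNat 0)) PySem.Dict.empty
  -- for node in transformation_dict: precomputed_stone_n[node][0] = 1   (IndexError excluded by Pre_)
  let pre1 : PySem.Dict Int (List Int) :=
    d.keys.foldl (fun acc node => acc.insert node (PySem.List.pySetD (acc.getD node []) 0 1)) pre0
  -- for depth in range(1, limit + 1): for node, (stone, _) in transformation_dict.items(): …
  let pre2 : PySem.Dict Int (List Int) :=
    (PySem.List.pyRange 1 (limit + 1) 1).foldl (fun acc depth =>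
      d.items.foldl (fun acc p =>
        acc.insert p.1 (PySem.List.pySetD (acc.getD p.1 []) depth
          ((p.2.1.map (fun nb => PySem.List.pyGetD (acc.getD nb []) (depth - 1) 0)).sum))) acc) pre1
  pre2.items

-- ===== PORT B =====
-- count(node, depth): memoized recursion on depth; the node's output list IS the memo
-- (depth from range(limit+1) is nonnegative, so the Nat fuel IS the Python depth).
-- result[node] is ported as getD (KeyError excluded by Pre_); lst.append mutates the list
-- held by the dict, ported as modify on the current dict.
def pvCount (d : PySem.Dict Int (List Int × Int)) :
    Nat → Int → PySem.Dict Int (List Int) → Int × PySem.Dict Int (List Int)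
  | 0, node, res =>
    let lst := res.getD node []
    if (0 : Int) < lst.length then (PySem.List.pyGetD lst 0 0, res)
    else (1, res.modify node [] (· ++ [1]))
  | t + 1, node, res =>
    let lst := res.getD node []
    if (t : Int) + 1 < lst.length then (PySem.List.pyGetD lst ((t : Int) + 1) 0, res)
    else
      -- v = 0; for neighbor in transformation_dict[node][0]: v += count(neighbor, depth - 1)
      let r := (d.getD node ([], 0)).1.foldl
        (fun (acc : Int × PySem.Dict Int (List Int)) nb =>
          let w := pvCount d t nb acc.2
          (acc.1 + w.1, w.2)) (0, res)
      (r.1, r.2.modify node [] (· ++ [r.1]))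

def precompute_stones_alt (transformation_dict : List (Int × List Int × Int)) (limit : Int) : List (Int × List Int) :=
  let d : PySem.Dict Int (List Int × Int) := PySem.Dict.ofList transformation_dict
  -- result = {node: [] for node in transformation_dict}
  let res0 : PySem.Dict Int (List Int) :=
    d.keys.foldl (fun acc node => acc.insert node []) PySem.Dict.empty
  -- for depth in range(limit + 1): for node in transformation_dict: count(node, depth)
  let res : PySem.Dict Int (List Int) :=
    (PySem.List.pyRange 0 (limit + 1) 1).foldl (fun res depth =>
      d.keys.foldl (fun r node => (pvCount d depth.toNat node r).2) res) res0
  res.items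

-- ===== PRECONDITION & SPEC =====
-- Pre_ excludes exactly the raising inputs: limit < 0 with a nonempty dict (A's IndexError on the
-- empty per-node arrays) and, when the depth loop runs, a neighbor that is not a key (KeyError in both).
def Pre_precompute_stones (transformation_dict : List (Int × List Int × Int)) (limit : Int) : Prop :=
  (transformation_dict = [] ∨ 0 ≤ limit) ∧
  (1 ≤ limit → ∀ p ∈ (PySem.Dict.ofList transformation_dict).items, ∀ nb ∈ p.2.1,
      nb ∈ transformation_dict.map Prod.fst)
instance (transformation_dict : List (Int × List Int × Int)) (limit : Int) : Decidable (Pre_precompute_stones transformation_dict limit) := by unfold Pre_precompute_stones; infer_instance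

def pvWitness_precompute_stones : (List (Int × List Int × Int)) × Int := ([(0, ([0, 1], 7)), (1, ([0], 2))], 3)

def Spec_precompute_stones (transformation_dict : List (Int × List Int × Int)) (limit : Int) (out : List (Int × List Int)) : Prop := out = precompute_stones_alt transformation_dict limit
instance (transformation_dict : List (Int × List Int × Int)) (limit : Int) (out : List (Int × List Int)) : Decidable (Spec_precompute_stones transformation_dict limit out) := by unfold Spec_precompute_stones; infer_instance

-- ===== CLAIM (what is proved, stated in full; the proofs are below) =====
def Claim_equal_precompute_stones : Prop := ∀ (transformation_dict : List (Int × List Int × Int)) (limit : Int), Dom_precompute_stones transformation_dict limit → Pre_precompute_stones transformation_dict limit → Spec_precompute_stones transformation_dict limit (precompute_stones transformation_dict limit)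

-- ===== LEMMAS AND PROOFS =====

-- stone list of a node (value lookup with Python's dict.get default shape used by the ports)
def pvStone (d : PySem.Dict Int (List Int × Int)) (k : Int) : List Int := (d.getD k ([], 0)).1

-- the recurrence A computes: number of stones after t steps starting from node k
def pvC (d : PySem.Dict Int (List Int × Int)) : Nat → Int → Int
  | 0, k => if d.contains k then 1 else 0
  | t + 1, k => if d.contains k then ((pvStone d k).map (pvC d t)).sum else 0

-- the recurrence B's count computes (1 at depth 0 for every node, as in the Python)
def pvN (d : PySem.Dict Int (List Int × Int)) : Nat → Int → Int
  | 0, _ => 1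
  | t + 1, k => ((pvStone d k).map (pvN d t)).sum

-- A's per-node array after outer depth t has been processed
def pvArr (d : PySem.Dict Int (List Int × Int)) (n t : Nat) (k : Int) : List Int :=
  (List.range (n + 1)).map (fun j => if j ≤ t then pvC d j k else 0)

lemma pv_C_not_contains (d : PySem.Dict Int (List Int × Int)) (t : Nat) (k : Int)
    (h : d.contains k = false) : pvC d t k = 0 := by
  cases t <;> simp [pvC, h]

lemma pv_getD_foldl_insert_const {ν : Type} (c : ν) (dflt : ν) (x : Int) :
    ∀ (ks : List Int) (acc : PySem.Dict Int ν),
    ((ks.foldl (fun a k => a.insert k c) acc).getD x dflt)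
      = if x ∈ ks then c else acc.getD x dflt := by
  intro ks
  induction ks with
  | nil => intro acc; simp
  | cons k ks ih =>
    intro acc
    simp only [List.foldl_cons, ih, List.mem_cons]
    by_cases hx : x ∈ ks
    · simp [hx]
    · by_cases hk : x = k <;> simp [hx, hk, PySem.Dict.getD_insert]

lemma pv_getD_foldl_insert_self {ν : Type} (g : Int → ν → ν) (dflt : ν) (x : Int) :
    ∀ (ks : List Int), ks.Nodup → ∀ (acc : PySem.Dict Int ν),
    ((ks.foldl (fun a k => a.insert k (g k (a.getD k dflt))) acc).getD x dflt)
      = if x ∈ ks then g x (acc.getD x dflt) else acc.getD x dflt := by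
  intro ks
  induction ks with
  | nil => intro _ acc; simp
  | cons k ks ih =>
    intro hnd acc
    obtain ⟨hk, hnd'⟩ := List.nodup_cons.mp hnd
    simp only [List.foldl_cons, ih hnd', List.mem_cons]
    by_cases hx : x ∈ ks
    · have hne : x ≠ k := fun h => hk (h ▸ hx)
      simp [hx, hne, PySem.Dict.getD_insert]
    · by_cases hxk : x = k <;> simp [hx, hxk, hk, PySem.Dict.getD_insert]

lemma pv_update_subset (s ls : List Int) (h : ∀ x ∈ ls, x ∈ s) : PySem.Set.update s ls = s := by
  rw [PySem.Set.update_eq_append_filter]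
  have hnil : List.filter (fun y => !PySem.Set.contains s y) (PySem.Set.ofList ls) = [] := by
    apply List.filter_eq_nil_iff.mpr
    intro y hy
    simp only [Bool.not_eq_true, Bool.not_eq_false']
    exact (PySem.Set.contains_iff _ _).mpr (h y ((PySem.Set.mem_ofList _ _).mp hy))
  rw [hnil, List.append_nil]

-- one inner pass of A at a fixed depth: every node's array gets index `depth` written from
-- the stable depth-1 readings r
lemma pv_A_inner (L : Nat) (depth : Int) (h1 : 1 ≤ depth) (hL : depth < (L : Int))
    (r : Int → Int) (S : Int → List Int) (x : Int) :
    ∀ (ps : List (Int × List Int × Int)) (acc : PySem.Dict Int (List Int)),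
    (ps.map Prod.fst).Nodup →
    (∀ p ∈ ps, p.2.1 = S p.1) →
    (∀ k, PySem.List.pyGetD (acc.getD k []) (depth - 1) 0 = r k) →
    (∀ k ∈ ps.map Prod.fst, (acc.getD k []).length = L) →
    ((ps.foldl (fun a p =>
        a.insert p.1 (PySem.List.pySetD (a.getD p.1 []) depth
          ((p.2.1.map (fun nb => PySem.List.pyGetD (a.getD nb []) (depth - 1) 0)).sum))) acc).getD x [])
      = if x ∈ ps.map Prod.fst
        then PySem.List.pySetD (acc.getD x []) depth (((S x).map r).sum)
        else acc.getD x [] := by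
  intro ps
  induction ps with
  | nil => intro acc _ _ _ _; simp
  | cons p ps ih =>
    intro acc hnd hS hr hlen
    simp only [List.map_cons] at hnd hlen ⊢
    obtain ⟨hp1, hnd'⟩ := List.nodup_cons.mp hnd
    simp only [List.foldl_cons]
    have hd0 : (0 : Int) ≤ depth := by omega
    have hdn : ((depth.toNat : Int)) = depth := Int.toNat_of_nonneg hd0
    have hd1n : (((depth - 1).toNat : Int)) = depth - 1 := Int.toNat_of_nonneg (by omega)
    have hlenp : (acc.getD p.1 []).length = L := hlen p.1 (List.mem_cons_self ..)
    have hdL : depth.toNat < L := by omega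
    have hsum : ((p.2.1.map (fun nb => PySem.List.pyGetD (acc.getD nb []) (depth - 1) 0)).sum)
        = ((S p.1).map r).sum := by
      rw [hS p (List.mem_cons_self ..)]
      congr 1
      exact List.map_congr_left (fun nb _ => hr nb)
    have hget : ∀ k, (acc.insert p.1 (PySem.List.pySetD (acc.getD p.1 []) depth
          ((p.2.1.map (fun nb => PySem.List.pyGetD (acc.getD nb []) (depth - 1) 0)).sum))).getD k []
        = if k = p.1 then PySem.List.pySetD (acc.getD p.1 []) depth (((S p.1).map r).sum)
          else acc.getD k [] := by
      intro k
      rw [PySem.Dict.getD_insert, hsum]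
    have hr' : ∀ k, PySem.List.pyGetD ((acc.insert p.1 (PySem.List.pySetD (acc.getD p.1 []) depth
          ((p.2.1.map (fun nb => PySem.List.pyGetD (acc.getD nb []) (depth - 1) 0)).sum))).getD k []) (depth - 1) 0 = r k := by
      intro k
      rw [hget k]
      by_cases hk : k = p.1
      · rw [if_pos hk, hk]
        have := PySem.List.pyGetD_pySetD_natCast (acc.getD p.1 []) depth.toNat (depth - 1).toNat
          (((S p.1).map r).sum) 0 (by omega)
        rw [hdn, hd1n] at this
        rw [this, if_neg (by omega), hr p.1]
      · rw [if_neg hk, hr k]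
    have hlen' : ∀ k ∈ ps.map Prod.fst, ((acc.insert p.1 (PySem.List.pySetD (acc.getD p.1 []) depth
          ((p.2.1.map (fun nb => PySem.List.pyGetD (acc.getD nb []) (depth - 1) 0)).sum))).getD k []).length = L := by
      intro k hk
      rw [hget k]
      by_cases hkp : k = p.1
      · rw [if_pos hkp, PySem.List.length_pySetD, hlenp]
      · rw [if_neg hkp]; exact hlen k (List.mem_cons_of_mem _ hk)
    rw [ih _ hnd' (fun q hq => hS q (List.mem_cons_of_mem _ hq)) hr' hlen']
    by_cases hx : x ∈ ps.map Prod.fst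
    · have hxne : x ≠ p.1 := fun h => hp1 (h ▸ hx)
      rw [if_pos hx, if_pos (List.mem_cons_of_mem _ hx), hget x, if_neg hxne]
    · rw [if_neg hx, hget x]
      by_cases hxp : x = p.1
      · rw [if_pos hxp, if_pos (by simp [hxp]), hxp]
      · rw [if_neg hxp, if_neg (by simp [hxp, hx])]

lemma pv_arr_zero (d : PySem.Dict Int (List Int × Int)) (n : Nat) (k : Int)
    (hk : d.contains k = true) :
    (List.replicate (n + 1) (0 : Int)).set 0 1 = pvArr d n 0 k := by
  apply List.ext_getElem
  · simp [pvArr]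
  · intro j h1 h2
    simp only [pvArr, List.getElem_set, List.getElem_replicate, List.getElem_map, List.getElem_range]
    by_cases hj : j = 0
    · subst hj; simp [pvC, hk]
    · have h0 : ¬ (0 = j) := fun h => hj h.symm
      have h0' : ¬ (j ≤ 0) := by omega
      simp [h0, h0']

lemma pv_arr_step (d : PySem.Dict Int (List Int × Int)) (n t : Nat) (k : Int) :
    (pvArr d n t k).set (t + 1) (pvC d (t + 1) k) = pvArr d n (t + 1) k := by
  apply List.ext_getElem
  · simp [pvArr]
  · intro j h1 h2
    simp only [pvArr, List.getElem_set, List.getElem_map, List.getElem_range]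
    by_cases hj : j = t + 1
    · subst hj; simp
    · have hne : ¬ (t + 1 = j) := fun h => hj h.symm
      by_cases hle : j ≤ t
      · have : j ≤ t + 1 := by omega
        simp [hne, hle, this]
      · have : ¬ (j ≤ t + 1) := by omega
        simp [hne, hle, this]

lemma pv_arr_length (d : PySem.Dict Int (List Int × Int)) (n t : Nat) (k : Int) :
    (pvArr d n t k).length = n + 1 := by
  simp [pvArr]

lemma pv_arr_read (d : PySem.Dict Int (List Int × Int)) (n t j : Nat) (k : Int)
    (hj : j ≤ t) (hn : j ≤ n) :
    PySem.List.pyGetD (pvArr d n t k) (j : Int) 0 = pvC d j k := by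
  have h0 : (0 : Int) ≤ (j : Int) := by positivity
  have h1 : (j : Int) < ((pvArr d n t k).length : Int) := by
    rw [pv_arr_length]; exact_mod_cast Nat.lt_succ_of_le hn
  rw [PySem.List.pyGetD_eq_getElem _ _ h0 h1]
  simp only [pvArr, Int.toNat_natCast, List.getElem_map, List.getElem_range]
  simp [hj]

lemma pv_arr_full (d : PySem.Dict Int (List Int × Int)) (n : Nat) (k : Int) :
    pvArr d n n k = (List.range (n + 1)).map (fun j => pvC d j k) := by
  unfold pvArr
  apply List.map_congr_left
  intro j hj
  have : j ≤ n := by simpa [Nat.lt_succ_iff] using List.mem_range.mp hj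
  simp [this]

-- A's outer loop invariant
lemma pv_A_outer (d : PySem.Dict Int (List Int × Int)) (hnd : d.keys.Nodup) (n : Nat)
    (pre1 : PySem.Dict Int (List Int))
    (hk1 : pre1.keys = d.keys)
    (hpre1 : ∀ x, pre1.getD x [] = if x ∈ d.keys then pvArr d n 0 x else []) :
    ∀ t : Nat, t ≤ n →
    (((PySem.List.pyRange 1 ((t : Int) + 1) 1).foldl (fun acc depth =>
        d.items.foldl (fun a p =>
          a.insert p.1 (PySem.List.pySetD (a.getD p.1 []) depth
            ((p.2.1.map (fun nb => PySem.List.pyGetD (a.getD nb []) (depth - 1) 0)).sum))) acc) pre1).keys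
        = d.keys) ∧
    ∀ x, (((PySem.List.pyRange 1 ((t : Int) + 1) 1).foldl (fun acc depth =>
        d.items.foldl (fun a p =>
          a.insert p.1 (PySem.List.pySetD (a.getD p.1 []) depth
            ((p.2.1.map (fun nb => PySem.List.pyGetD (a.getD nb []) (depth - 1) 0)).sum))) acc) pre1).getD x [])
      = if x ∈ d.keys then pvArr d n t x else [] := by
  have hkeys : d.items.map Prod.fst = d.keys := rfl
  intro t
  induction t with
  | zero =>
    intro _
    have hnil : PySem.List.pyRange 1 (((0 : Nat) : Int) + 1) 1 = [] := by
      apply PySem.List.pyRange_one_eq_nil; norm_num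
    rw [hnil]
    exact ⟨hk1, hpre1⟩
  | succ t ih =>
    intro ht
    obtain ⟨ihk, ihg⟩ := ih (Nat.le_of_succ_le ht)
    have hsplit : PySem.List.pyRange 1 (((t + 1 : Nat) : Int) + 1) 1
        = PySem.List.pyRange 1 ((t : Int) + 1) 1 ++ [(t : Int) + 1] := by
      have : (((t + 1 : Nat) : Int) + 1) = ((t : Int) + 1) + 1 := by push_cast; ring
      rw [this]
      exact PySem.List.pyRange_one_succ_right (by omega)
    rw [hsplit, List.foldl_append]
    set acc := (PySem.List.pyRange 1 ((t : Int) + 1) 1).foldl (fun acc depth =>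
        d.items.foldl (fun a p =>
          a.insert p.1 (PySem.List.pySetD (a.getD p.1 []) depth
            ((p.2.1.map (fun nb => PySem.List.pyGetD (a.getD nb []) (depth - 1) 0)).sum))) acc) pre1 with hacc
    simp only [List.foldl_cons, List.foldl_nil]
    have hinner := pv_A_inner (n + 1) ((t : Int) + 1) (by omega)
      (by push_cast; omega) (pvC d t) (pvStone d)
    have hS : ∀ p ∈ d.items, p.2.1 = pvStone d p.1 := by
      intro p hp
      have : d.getD p.1 ([], 0) = p.2 := PySem.Dict.getD_of_mem_items d (by simpa using hp) hnd _
      simp [pvStone, this]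
    have hr : ∀ k, PySem.List.pyGetD (acc.getD k []) ((t : Int) + 1 - 1) 0 = pvC d t k := by
      intro k
      have : ((t : Int) + 1 - 1) = ((t : Nat) : Int) := by ring
      rw [this, ihg k]
      by_cases hk : k ∈ d.keys
      · rw [if_pos hk]
        exact pv_arr_read d n t t k le_rfl (by omega)
      · rw [if_neg hk]
        have hc : d.contains k = false := by
          rcases Bool.eq_false_or_eq_true (d.contains k) with h | h
          · exact absurd ((PySem.Dict.contains_iff_mem_keys d k).mp h) hk
          · exact h
        simp [PySem.List.pyGetD, pv_C_not_contains d t k hc]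
    have hlen : ∀ k ∈ d.items.map Prod.fst, (acc.getD k []).length = n + 1 := by
      intro k hk
      rw [hkeys] at hk
      rw [ihg k, if_pos hk, pv_arr_length]
    constructor
    · rw [PySem.Dict.keys_foldl_insert_key, ihk, hkeys, pv_update_subset _ _ (fun x hx => hx)]
    · intro x
      rw [hinner x d.items acc (by rw [hkeys]; exact hnd) hS hr hlen, hkeys]
      by_cases hx : x ∈ d.keys
      · rw [if_pos hx, if_pos hx, ihg x, if_pos hx]
        have hc : d.contains x = true := (PySem.Dict.contains_iff_mem_keys d x).mpr hx
        have hsum : ((pvStone d x).map (pvC d t)).sum = pvC d (t + 1) x := by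
          simp [pvC, hc]
        rw [hsum, PySem.List.pySetD_of_nonneg _ _ (by positivity)]
        have htn : ((t : Int) + 1).toNat = t + 1 := by omega
        rw [htn]
        exact pv_arr_step d n t x
      · rw [if_neg hx, if_neg hx, ihg x, if_neg hx]

-- reading a cached entry: lst[depth] on a filled prefix
lemma pv_read_prefix (d : PySem.Dict Int (List Int × Int)) (L j : Nat) (node : Int) (hj : j < L) :
    PySem.List.pyGetD ((List.range L).map (fun i => pvN d i node)) (j : Int) 0 = pvN d j node := by
  have h0 : (0 : Int) ≤ (j : Int) := by positivity
  have h1 : (j : Int) < (((List.range L).map (fun i => pvN d i node)).length : Int) := by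
    simp only [List.length_map, List.length_range]
    exact_mod_cast hj
  rw [PySem.List.pyGetD_eq_getElem _ _ h0 h1]
  simp

-- HIT: the requested depth is already in the node's list; nothing changes
lemma pv_count_hit (d : PySem.Dict Int (List Int × Int)) (t L : Nat) (node : Int)
    (res : PySem.Dict Int (List Int))
    (hL : res.getD node [] = (List.range L).map (fun j => pvN d j node)) (ht : t < L) :
    pvCount d t node res = (pvN d t node, res) := by
  cases t with
  | zero =>
    simp only [pvCount, hL]
    rw [if_pos (by simp only [List.length_map, List.length_range]; exact_mod_cast ht)]
    simp only [Prod.mk.injEq]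
    refine ⟨?_, trivial⟩
    simpa using pv_read_prefix d L 0 node ht
  | succ s =>
    simp only [pvCount, hL]
    rw [if_pos (by simp only [List.length_map, List.length_range]; exact_mod_cast ht)]
    simp only [Prod.mk.injEq]
    refine ⟨?_, trivial⟩
    simpa [Int.natCast_succ] using pv_read_prefix d L (s + 1) node ht

-- the neighbor loop when every neighbor is a cache hit: pure sum, dict unchanged
lemma pv_fold_hits (d : PySem.Dict Int (List Int × Int)) (t : Nat) :
    ∀ (l : List Int) (acc : Int × PySem.Dict Int (List Int)),
    (∀ nb ∈ l, ∃ L, t < L ∧ acc.2.getD nb [] = (List.range L).map (fun j => pvN d j nb)) →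
    l.foldl (fun acc nb => let w := pvCount d t nb acc.2; (acc.1 + w.1, w.2)) acc
      = (acc.1 + (l.map (pvN d t)).sum, acc.2) := by
  intro l
  induction l with
  | nil => intro acc _; simp
  | cons nb l ih =>
    intro acc h
    obtain ⟨L, hL1, hL2⟩ := h nb (List.mem_cons_self ..)
    simp only [List.foldl_cons]
    rw [pv_count_hit d t L nb acc.2 hL2 hL1]
    have := ih (acc.1 + pvN d t nb, acc.2) (fun x hx => h x (List.mem_cons_of_mem _ hx))
    rw [this]
    simp only [List.map_cons, List.sum_cons]
    rw [add_assoc]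

-- MISS at the exact next level: compute from the neighbors and append
lemma pv_count_miss (d : PySem.Dict Int (List Int × Int)) (m : Nat) (node : Int)
    (res : PySem.Dict Int (List Int))
    (hn : res.getD node [] = (List.range m).map (fun j => pvN d j node))
    (hnb : ∀ t : Nat, m = t + 1 → ∀ nb ∈ pvStone d node,
        ∃ L, t < L ∧ res.getD nb [] = (List.range L).map (fun j => pvN d j nb)) :
    pvCount d m node res = (pvN d m node, res.modify node [] (· ++ [pvN d m node])) := by
  cases m with
  | zero =>
    have h0 : res.getD node [] = [] := by simpa using hn
    simp [pvCount, h0, pvN]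
  | succ t =>
    simp only [pvCount, hn]
    rw [if_neg (by simp only [List.length_map, List.length_range]; push_cast; omega)]
    rw [pv_fold_hits d t (d.getD node ([], 0)).1 (0, res) (hnb t rfl)]
    have hsum : (0 : Int) + (((d.getD node ([], 0)).1).map (pvN d t)).sum = pvN d (t + 1) node := by
      simp [pvN, pvStone]
    simp only [hsum]

-- B's inner loop over the keys at a fixed depth m
lemma pv_B_inner (d : PySem.Dict Int (List Int × Int)) (m : Nat)
    (hcl : 1 ≤ m → ∀ k ∈ d.keys, ∀ nb ∈ pvStone d k, nb ∈ d.keys) :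
    ∀ (ks : List Int), (∀ k ∈ ks, k ∈ d.keys) → ks.Nodup →
    ∀ (res : PySem.Dict Int (List Int)), res.keys = d.keys →
    (∀ x ∈ d.keys, res.getD x []
        = (List.range (if x ∈ ks then m else m + 1)).map (fun j => pvN d j x)) →
    (ks.foldl (fun r node => (pvCount d m node r).2) res).keys = d.keys ∧
    ∀ x ∈ d.keys, (ks.foldl (fun r node => (pvCount d m node r).2) res).getD x []
        = (List.range (m + 1)).map (fun j => pvN d j x) := by
  intro ks
  induction ks with
  | nil =>
    intro _ _ res hk hr
    exact ⟨hk, fun x hx => by simpa using hr x hx⟩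
  | cons k ks ih =>
    intro hsub hnd res hk hr
    obtain ⟨hknotin, hnd'⟩ := List.nodup_cons.mp hnd
    have hkkey : k ∈ d.keys := hsub k (List.mem_cons_self ..)
    have hmiss : pvCount d m k res = (pvN d m k, res.modify k [] (· ++ [pvN d m k])) := by
      apply pv_count_miss
      · have := hr k hkkey
        simpa [List.mem_cons] using this
      · intro t hm nb hnb
        have hnbk : nb ∈ d.keys := hcl (by omega) k hkkey nb hnb
        exact ⟨if nb ∈ k :: ks then m else m + 1, by split <;> omega, hr nb hnbk⟩
    simp only [List.foldl_cons, hmiss]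
    set res1 := res.modify k [] (· ++ [pvN d m k]) with hres1
    have hk1 : res1.keys = d.keys := by
      rw [hres1, PySem.Dict.keys_modify,
        PySem.Dict.keys_insert_of_contains res _
          ((PySem.Dict.contains_iff_mem_keys res k).mpr (hk ▸ hkkey))]
      exact hk
    have hr1 : ∀ x ∈ d.keys, res1.getD x []
        = (List.range (if x ∈ ks then m else m + 1)).map (fun j => pvN d j x) := by
      intro x hx
      rw [hres1, PySem.Dict.getD_modify]
      by_cases hxk : x = k
      · subst hxk
        rw [if_pos rfl, if_neg hknotin]
        have := hr x hx
        rw [if_pos (List.mem_cons_self ..)] at this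
        rw [this, List.range_succ, List.map_append]
        simp
      · rw [if_neg hxk]
        have := hr x hx
        simpa [List.mem_cons, hxk] using this
    exact ih (fun x hx => hsub x (List.mem_cons_of_mem _ hx)) hnd' res1 hk1 hr1

-- B's outer loop over the depths
lemma pv_B_outer (d : PySem.Dict Int (List Int × Int)) (hnd : d.keys.Nodup)
    (res0 : PySem.Dict Int (List Int))
    (hk0 : res0.keys = d.keys)
    (hr0 : ∀ x, res0.getD x [] = [])
    (n : Nat)
    (hcl : 1 ≤ n → ∀ k ∈ d.keys, ∀ nb ∈ pvStone d k, nb ∈ d.keys) :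
    ∀ m : Nat, m ≤ n + 1 →
    (((List.range m).map (fun j : Nat => (j : Int))).foldl (fun res depth =>
        d.keys.foldl (fun r node => (pvCount d depth.toNat node r).2) res) res0).keys = d.keys ∧
    ∀ x ∈ d.keys, (((List.range m).map (fun j : Nat => (j : Int))).foldl (fun res depth =>
        d.keys.foldl (fun r node => (pvCount d depth.toNat node r).2) res) res0).getD x []
      = (List.range m).map (fun j => pvN d j x) := by
  intro m
  induction m with
  | zero =>
    intro _
    exact ⟨hk0, fun x _ => by simp [hr0 x]⟩
  | succ m ih =>
    intro hm
    obtain ⟨ihk, ihr⟩ := ih (by omega)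
    rw [List.range_succ, List.map_append, List.foldl_append]
    simp only [List.map_cons, List.map_nil, List.foldl_cons, List.foldl_nil]
    set st := ((List.range m).map (fun j : Nat => (j : Int))).foldl (fun res depth =>
        d.keys.foldl (fun r node => (pvCount d depth.toNat node r).2) res) res0 with hst
    have hcl' : 1 ≤ ((m : Int)).toNat → ∀ k ∈ d.keys, ∀ nb ∈ pvStone d k, nb ∈ d.keys := by
      intro h1
      exact hcl (by omega)
    obtain ⟨hk', hr'⟩ := pv_B_inner d ((m : Int)).toNat hcl' d.keys (fun x hx => hx) hnd st ihk
      (by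
        intro x hx
        have := ihr x hx
        rw [if_pos hx]
        have htn : ((m : Int)).toNat = m := by omega
        rw [htn]
        exact this)
    have htn : ((m : Int)).toNat = m := by omega
    refine ⟨hk', ?_⟩
    intro x hx
    rw [hr' x hx, htn, List.range_succ]

-- the keys of dict(td) are exactly the first components of td (as a set)
lemma pv_mem_keys_ofList {ν : Type} (td : List (Int × ν)) (x : Int) :
    x ∈ (PySem.Dict.ofList td).keys ↔ x ∈ td.map Prod.fst := by
  show x ∈ (td.foldl (fun d p => d.insert p.1 p.2) PySem.Dict.empty).keys ↔ _
  rw [show (fun (d : PySem.Dict Int ν) (p : Int × ν) => d.insert p.1 p.2)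
        = (fun d p => d.insert p.1 ((fun (_ : PySem.Dict Int ν) (q : Int × ν) => q.2) d p)) from rfl,
      PySem.Dict.keys_foldl_insert_key, PySem.Dict.keys_empty, PySem.Set.update_nil_left]
  exact PySem.Set.mem_ofList _ _

-- the per-item neighbor-closure of Pre_ read on the stone lists
lemma pv_stone_closure (d : PySem.Dict Int (List Int × Int)) (hnd : d.keys.Nodup)
    (hcl : ∀ p ∈ d.items, ∀ nb ∈ p.2.1, nb ∈ d.keys) :
    ∀ k ∈ d.keys, ∀ nb ∈ pvStone d k, nb ∈ d.keys := by
  intro k hkk nb hnb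
  obtain ⟨p, hp, hp1⟩ := List.mem_map.mp hkk
  have hgd : d.getD p.1 ([], 0) = p.2 := PySem.Dict.getD_of_mem_items d hp hnd _
  apply hcl p hp nb
  rw [pvStone, ← hp1, hgd] at hnb
  exact hnb

-- on the keys, under Pre_'s neighbor-closure, A's pvC and B's pvN agree
lemma pv_C_eq_N (d : PySem.Dict Int (List Int × Int)) (hnd : d.keys.Nodup)
    (hcl : ∀ p ∈ d.items, ∀ nb ∈ p.2.1, nb ∈ d.keys) :
    ∀ (j : Nat) (k : Int), k ∈ d.keys → pvC d j k = pvN d j k := by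
  have hstone : ∀ k ∈ d.keys, ∀ nb ∈ pvStone d k, nb ∈ d.keys := pv_stone_closure d hnd hcl
  intro j
  induction j with
  | zero =>
    intro k hkk
    have hc : d.contains k = true := (PySem.Dict.contains_iff_mem_keys d k).mpr hkk
    simp [pvC, pvN, hc]
  | succ j ih =>
    intro k hkk
    have hc : d.contains k = true := (PySem.Dict.contains_iff_mem_keys d k).mpr hkk
    simp only [pvC, pvN, hc, if_true]
    congr 1
    exact List.map_congr_left (fun nb hnb => ih nb (hstone k hkk nb hnb))

-- ===== VERDICT (by name: the statement is the Claim_ definition above) =====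
theorem precompute_stones_spec : Claim_equal_precompute_stones := by
  intro td limit _hdom hpre
  unfold Spec_precompute_stones precompute_stones precompute_stones_alt
  dsimp only
  obtain ⟨hlim, hclosure⟩ := hpre
  by_cases h0 : 0 ≤ limit
  · -- limit = n ≥ 0
    obtain ⟨n, rfl⟩ : ∃ n : Nat, limit = (n : Int) := ⟨limit.toNat, (Int.toNat_of_nonneg h0).symm⟩
    set d := PySem.Dict.ofList td with hd
    have hnd : d.keys.Nodup := PySem.Dict.nodup_keys_ofList td
    have hkeys : d.items.map Prod.fst = d.keys := rfl
    have hrep : (((n : Int)) + 1).toNat = n + 1 := by omega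
    -- A side: pre0 and pre1
    set pre0 := d.keys.foldl (fun acc node => acc.insert node (List.replicate ((n : Int) + 1).toNat (0 : Int))) PySem.Dict.empty with hpre0
    set pre1 := d.keys.foldl (fun acc node => acc.insert node (PySem.List.pySetD (acc.getD node []) 0 1)) pre0 with hpre1
    have hpre0get : ∀ x, pre0.getD x [] = if x ∈ d.keys then List.replicate (n + 1) 0 else [] := by
      intro x
      rw [hpre0, pv_getD_foldl_insert_const, hrep, PySem.Dict.getD_empty]
    have hpre0k : pre0.keys = d.keys := by
      rw [hpre0, PySem.Dict.keys_foldl_insert, PySem.Dict.keys_empty, PySem.Set.update_nil_left,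
        PySem.Set.ofList_eq_self_of_nodup _ hnd]
    have hpre1get : ∀ x, pre1.getD x [] = if x ∈ d.keys then pvArr d n 0 x else [] := by
      intro x
      rw [hpre1, pv_getD_foldl_insert_self (fun _ xs => PySem.List.pySetD xs 0 1) [] x d.keys hnd pre0]
      by_cases hx : x ∈ d.keys
      · have hc : d.contains x = true := (PySem.Dict.contains_iff_mem_keys d x).mpr hx
        rw [if_pos hx, if_pos hx, hpre0get x, if_pos hx,
          PySem.List.pySetD_of_nonneg _ _ (by omega)]
        exact pv_arr_zero d n x hc
      · rw [if_neg hx, if_neg hx, hpre0get x, if_neg hx]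
    have hpre1k : pre1.keys = d.keys := by
      rw [hpre1, PySem.Dict.keys_foldl_insert, hpre0k, pv_update_subset _ _ (fun x hx => hx)]
    obtain ⟨hkA, hgA⟩ := pv_A_outer d hnd n pre1 hpre1k hpre1get n le_rfl
    -- B side
    set res0 := d.keys.foldl (fun acc node => acc.insert node ([] : List Int)) PySem.Dict.empty with hres0
    have hr0 : ∀ x, res0.getD x [] = [] := by
      intro x
      rw [hres0, pv_getD_foldl_insert_const, PySem.Dict.getD_empty]
      simp
    have hk0 : res0.keys = d.keys := by
      rw [hres0, PySem.Dict.keys_foldl_insert, PySem.Dict.keys_empty, PySem.Set.update_nil_left,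
        PySem.Set.ofList_eq_self_of_nodup _ hnd]
    have hrange : PySem.List.pyRange 0 ((n : Int) + 1) 1
        = (List.range (n + 1)).map (fun j : Nat => (j : Int)) := by
      have h1 : ((n : Int) + 1) = ((n + 1 : Nat) : Int) := by push_cast; ring
      rw [h1]
      exact PySem.List.pyRange_zero_natCast (n + 1)
    have hclI : 1 ≤ n → ∀ p ∈ d.items, ∀ nb ∈ p.2.1, nb ∈ d.keys := by
      intro h1 p hp nb hnb
      exact (pv_mem_keys_ofList td nb).mpr (hclosure (by exact_mod_cast h1) p hp nb hnb)
    obtain ⟨hkB, hgB⟩ := pv_B_outer d hnd res0 hk0 hr0 n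
      (fun h1 => pv_stone_closure d hnd (hclI h1)) (n + 1) le_rfl
    rw [hrange]
    -- assemble: both item lists are d.keys.map (k ↦ (k, counts 0..n))
    have hndA : ((PySem.List.pyRange 1 ((n : Int) + 1) 1).foldl (fun acc depth =>
        d.items.foldl (fun a p =>
          a.insert p.1 (PySem.List.pySetD (a.getD p.1 []) depth
            ((p.2.1.map (fun nb => PySem.List.pyGetD (a.getD nb []) (depth - 1) 0)).sum))) acc) pre1).keys.Nodup := by
      rw [hkA]; exact hnd
    have hndB : (((List.range (n + 1)).map (fun j : Nat => (j : Int))).foldl (fun res depth =>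
        d.keys.foldl (fun r node => (pvCount d depth.toNat node r).2) res) res0).keys.Nodup := by
      rw [hkB]; exact hnd
    rw [PySem.Dict.items_eq_map_keys _ hndA ([] : List Int),
      PySem.Dict.items_eq_map_keys _ hndB ([] : List Int), hkA, hkB]
    apply List.map_congr_left
    intro k hk
    rw [hgA k, if_pos hk, hgB k hk, pv_arr_full]
    -- pvC = pvN on the keys
    refine congrArg _ (List.map_congr_left ?_)
    intro j hj
    by_cases hn1 : n = 0
    · subst hn1
      have hj0 : j = 0 := by
        have := List.mem_range.mp hj
        omega
      subst hj0
      have hc : d.contains k = true := (PySem.Dict.contains_iff_mem_keys d k).mpr hk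
      simp [pvC, pvN, hc]
    · have hcl : ∀ p ∈ d.items, ∀ nb ∈ p.2.1, nb ∈ d.keys := by
        intro p hp nb hnb
        exact (pv_mem_keys_ofList td nb).mpr (hclosure (by omega) p hp nb hnb)
      exact pv_C_eq_N d hnd hcl j k hk
  · -- empty dict, negative limit
    have htd : td = [] := by
      rcases hlim with h | h
      · exact h
      · exact absurd h h0
    subst htd
    have hofl : PySem.Dict.ofList ([] : List (Int × List Int × Int)) = PySem.Dict.empty := rfl
    have hitA : (PySem.Dict.empty : PySem.Dict Int (List Int × Int)).items = [] := rfl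
    have hnilA : PySem.List.pyRange 1 (limit + 1) 1 = [] := by
      apply PySem.List.pyRange_one_eq_nil; omega
    have hnilB : PySem.List.pyRange 0 (limit + 1) 1 = [] := by
      apply PySem.List.pyRange_one_eq_nil; omega
    simp only [hofl, PySem.Dict.keys_empty, hitA, hnilA, hnilB, List.foldl_nil]
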